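-- pv_equiv track=rewrite | github.com/Arturoo0/mazePy | varSizing.py | adjustSize
-- ===== SOURCE A (Python) =====
-- def adjustSize(gridSize):
--
--     size = (700, 700)
--     pixelRange = list(range(700, 901))
--
--     for res in pixelRange:
--         if res % gridSize == 0:
--             size = (res, res)
--             break
--
--     return size
-- ===== SOURCE B (Python) =====
-- def adjustSize(gridSize):
--     g = abs(gridSize)
--     r = 700 % g  # ZeroDivisionError for gridSize == 0, as in A
--     c = 700 if r == 0 else 700 + (g - r)
--     return (c, c) if c <= 900 else (700, 700)
-- ===== Notes on version B (the rewrite author's own statement) =====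
-- stated objective: simpler
-- what changed: Replaced the 201-step linear scan of range(700,901) with a closed-form computation of the smallest multiple of |gridSize| that is >= 700 via one modulo operation.
import Mathlib
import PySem

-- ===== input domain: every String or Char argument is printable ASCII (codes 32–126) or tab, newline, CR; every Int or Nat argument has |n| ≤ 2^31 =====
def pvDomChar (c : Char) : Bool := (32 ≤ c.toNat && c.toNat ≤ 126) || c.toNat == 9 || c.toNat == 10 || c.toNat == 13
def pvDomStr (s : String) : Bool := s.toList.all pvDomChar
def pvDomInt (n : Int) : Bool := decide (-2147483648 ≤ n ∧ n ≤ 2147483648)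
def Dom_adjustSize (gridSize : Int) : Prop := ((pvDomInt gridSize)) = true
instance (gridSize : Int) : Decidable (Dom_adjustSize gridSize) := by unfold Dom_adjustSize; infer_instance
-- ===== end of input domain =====

-- B replaces A's linear scan of range(700,901) with a closed-form smallest multiple of |gridSize| ≥ 700 (objective: simpler).

-- ===== PORT A =====
-- the for-loop with break over pixelRange
def adjustSizeLoopA (gridSize : Int) : List Int → Int × Int
  | [] => (700, 700)
  | res :: rest =>
      if PySem.Int.mod res gridSize = 0 then (res, res)
      else adjustSizeLoopA gridSize rest

def adjustSize (gridSize : Int) : Int × Int :=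
  adjustSizeLoopA gridSize (PySem.List.pyRange 700 901 1)

-- ===== PORT B =====
def adjustSize_alt (gridSize : Int) : Int × Int :=
  let g : Int := |gridSize|
  let r : Int := PySem.Int.mod 700 g
  let c : Int := if r = 0 then 700 else 700 + (g - r)
  if c ≤ 900 then (c, c) else (700, 700)

-- ===== PRECONDITION & SPEC =====
-- Pre_ excludes gridSize = 0, on which A raises ZeroDivisionError (and B does too).
def Pre_adjustSize (gridSize : Int) : Prop := gridSize ≠ 0
instance (gridSize : Int) : Decidable (Pre_adjustSize gridSize) := by unfold Pre_adjustSize; infer_instance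
def pvWitness_adjustSize : Int := (7)

def Spec_adjustSize (gridSize : Int) (out : Int × Int) : Prop := out = adjustSize_alt gridSize
instance (gridSize : Int) (out : Int × Int) : Decidable (Spec_adjustSize gridSize out) := by unfold Spec_adjustSize; infer_instance

-- ===== CLAIM (what is proved, stated in full; the proofs are below) =====
def Claim_equal_adjustSize : Prop := ∀ (gridSize : Int), Dom_adjustSize gridSize → Pre_adjustSize gridSize → Spec_adjustSize gridSize (adjustSize gridSize)

-- ===== LEMMAS AND PROOFS =====

-- the loop test 'res % g == 0' is divisibility by |g|
lemma loopA_test (g x : Int) : (PySem.Int.mod x g = 0) ↔ |g| ∣ x := by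
  rw [PySem.Int.mod_eq_zero_iff_dvd]
  exact (abs_dvd g x).symm

-- if no element of [a, b) is a multiple of |g|, the scan falls through
lemma loopA_miss (g : Int) : ∀ (n : Nat) (a b : Int), b - a ≤ (n : Int) →
    (∀ x, a ≤ x → x < b → ¬ |g| ∣ x) →
    adjustSizeLoopA g (PySem.List.pyRange a b 1) = (700, 700) := by
  intro n
  induction n with
  | zero =>
      intro a b hn _
      rw [PySem.List.pyRange_one_eq_nil (by omega)]
      rfl
  | succ m ih =>
      intro a b hn hno
      by_cases hab : b ≤ a
      · rw [PySem.List.pyRange_one_eq_nil hab]; rfl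
      · rw [PySem.List.pyRange_one_cons (by omega)]
        unfold adjustSizeLoopA
        rw [if_neg (by rw [loopA_test]; exact hno a le_rfl (by omega))]
        exact ih (a + 1) b (by omega) (fun x hx1 hx2 => hno x (by omega) hx2)

-- the scan stops at the first multiple c of |g| in [a, b)
lemma loopA_hit (g c : Int) (hdvd : |g| ∣ c) : ∀ (n : Nat) (a b : Int),
    c - a ≤ (n : Int) → a ≤ c → c < b →
    (∀ x, a ≤ x → x < c → ¬ |g| ∣ x) →
    adjustSizeLoopA g (PySem.List.pyRange a b 1) = (c, c) := by
  intro n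
  induction n with
  | zero =>
      intro a b hn hac hcb _
      have hac' : a = c := by omega
      subst hac'
      rw [PySem.List.pyRange_one_cons (by omega)]
      unfold adjustSizeLoopA
      rw [if_pos ((loopA_test g a).mpr hdvd)]
  | succ m ih =>
      intro a b hn hac hcb hno
      rcases eq_or_lt_of_le hac with h | h
      · subst h
        rw [PySem.List.pyRange_one_cons (by omega)]
        unfold adjustSizeLoopA
        rw [if_pos ((loopA_test g a).mpr hdvd)]
      · rw [PySem.List.pyRange_one_cons (by omega)]
        unfold adjustSizeLoopA
        rw [if_neg (by rw [loopA_test]; exact hno a le_rfl h)]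
        exact ih (a + 1) b (by omega) (by omega) hcb
          (fun x hx1 hx2 => hno x (by omega) hx2)

-- B's candidate is the smallest multiple of |g| that is ≥ 700
lemma candidate_spec (g : Int) (hg : g ≠ 0) (gA r c : Int)
    (hgAd : gA = |g|) (hrd : r = PySem.Int.mod 700 gA)
    (hcd : c = if r = 0 then 700 else 700 + (gA - r)) :
    gA ∣ c ∧ 700 ≤ c ∧ (∀ x, 700 ≤ x → x < c → ¬ gA ∣ x) := by
  have hgA : 0 < gA := by rw [hgAd]; exact abs_pos.mpr hg
  have hr : r = 700 % gA := by rw [hrd]; exact PySem.Int.mod_eq_emod_of_pos hgA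
  have hrnn : 0 ≤ r := by rw [hr]; exact Int.emod_nonneg _ (by omega)
  have hrlt : r < gA := by rw [hr]; exact Int.emod_lt_of_pos _ hgA
  have hdecomp : gA * (700 / gA) = 700 - r := by
    rw [hr]; have := Int.mul_ediv_add_emod 700 gA; omega
  have hdvd : gA ∣ c := by
    by_cases h0 : r = 0
    · rw [hcd, if_pos h0]
      exact ⟨700 / gA, by omega⟩
    · rw [hcd, if_neg h0]
      exact ⟨700 / gA + 1, by rw [mul_add]; omega⟩
  have hclt : c - gA < 700 := by
    by_cases h0 : r = 0
    · rw [hcd, if_pos h0]; omega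
    · rw [hcd, if_neg h0]; omega
  refine ⟨hdvd, ?_, ?_⟩
  · by_cases h0 : r = 0
    · rw [hcd, if_pos h0]
    · rw [hcd, if_neg h0]; omega
  · intro x hx700 hxc hxdvd
    -- c - x is a positive multiple of gA, hence c - x ≥ gA; but c - gA < 700
    obtain ⟨k, hk⟩ := dvd_sub hdvd hxdvd
    have hkpos : 0 < k := by nlinarith
    have hge : gA ≤ c - x := by nlinarith
    omega

-- ===== VERDICT (by name: the statement is the Claim_ definition above) =====
theorem adjustSize_spec : Claim_equal_adjustSize := by
  intro g _ hg
  unfold Spec_adjustSize adjustSize adjustSize_alt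
  obtain ⟨hdvd, h700, hmin⟩ := candidate_spec g hg |g| (PySem.Int.mod 700 |g|)
    (if PySem.Int.mod 700 |g| = 0 then 700 else 700 + (|g| - PySem.Int.mod 700 |g|)) rfl rfl rfl
  simp only []
  set c := if PySem.Int.mod 700 |g| = 0 then 700 else 700 + (|g| - PySem.Int.mod 700 |g|) with hcdef
  by_cases hc : c ≤ 900
  · rw [if_pos hc]
    exact loopA_hit g c hdvd (c - 700).toNat 700 901 (by omega) h700 (by omega) hmin
  · rw [if_neg hc]
    exact loopA_miss g 201 700 901 (by omega)
      (fun x hx1 hx2 => hmin x hx1 (by omega))
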